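-- pv_equiv track=rewrite | github.com/Dslpss/double-web | shared/src/verification/signal_verifier.py | _check_prediction
-- ===== SOURCE A (Python) =====
-- def _check_prediction(predicted_color: str, actual_color: str) -> bool:
--     """Verifica se a predição está correta."""
--     # Normalizar cores
--     predicted = predicted_color.lower().strip()
--     actual = actual_color.lower().strip()
--
--     # Mapeamento de cores
--     color_mapping = {
--         'red': ['red', 'vermelho', 'r'],
--         'black': ['black', 'preto', 'b'],
--         'white': ['white', 'branco', 'w']
--     }
--
--     # Verificar correspondência
--     for color, variants in color_mapping.items():
--         if predicted in variants and actual in variants: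
--             return True
--
--     return False
-- ===== SOURCE B (Python) =====
-- _CANON = {
--     'red': 'red', 'vermelho': 'red', 'r': 'red',
--     'black': 'black', 'preto': 'black', 'b': 'black',
--     'white': 'white', 'branco': 'white', 'w': 'white',
-- }
--
--
-- def _check_prediction(predicted_color: str, actual_color: str) -> bool:
--     """Verifica se a predição está correta."""
--     p = _CANON.get(predicted_color.lower().strip())
--     a = _CANON.get(actual_color.lower().strip())
--     return p is not None and p == a
-- ===== Notes on version B (the rewrite author's own statement) =====
-- stated objective: idiomatic
-- what changed: Replaces the loop over color groups with two membership tests per group by a single flat reverse-lookup dict mapping each variant spelling to its canonical color: one lookup per argument and a None-guarded equality comparison.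
import Mathlib
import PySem

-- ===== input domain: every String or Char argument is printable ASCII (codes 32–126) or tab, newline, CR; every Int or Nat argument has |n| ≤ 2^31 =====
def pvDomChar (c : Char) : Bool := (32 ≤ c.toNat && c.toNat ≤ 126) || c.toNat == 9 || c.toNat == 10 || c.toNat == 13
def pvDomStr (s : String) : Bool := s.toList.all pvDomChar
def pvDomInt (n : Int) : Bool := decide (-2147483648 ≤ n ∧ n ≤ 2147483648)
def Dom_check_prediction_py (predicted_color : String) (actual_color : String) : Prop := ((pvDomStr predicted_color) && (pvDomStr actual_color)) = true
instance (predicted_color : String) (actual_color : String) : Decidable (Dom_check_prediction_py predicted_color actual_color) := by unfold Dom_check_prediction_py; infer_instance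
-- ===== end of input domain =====

-- B replaces A's loop over color groups (two membership tests per group) by a single flat
-- variant→canonical-color lookup table consulted once per argument (idiomatic, same cost).


-- ===== PORT A =====
-- the 'for color, variants in color_mapping.items(): if predicted in variants and actual in variants: return True' loop
def checkLoop (predicted : String) (actual : String) : List (String × List String) → Bool
  | [] => false
  | (_, variants) :: rest =>
      if variants.contains predicted && variants.contains actual then true
      else checkLoop predicted actual rest

def check_prediction_py (predicted_color : String) (actual_color : String) : Bool :=
  let predicted := PySem.Str.strip (PySem.Str.lower predicted_color)
  let actual := PySem.Str.strip (PySem.Str.lower actual_color)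
  let color_mapping : PySem.Dict String (List String) :=
    PySem.Dict.ofList [("red", ["red","vermelho","r"]),
                       ("black", ["black","preto","b"]),
                       ("white", ["white","branco","w"])]
  checkLoop predicted actual color_mapping.items

-- ===== PORT B =====
-- the flat reverse-lookup dict _CANON of Source B
def canonTable : PySem.Dict String String :=
  PySem.Dict.ofList [("red","red"),("vermelho","red"),("r","red"),
    ("black","black"),("preto","black"),("b","black"),
    ("white","white"),("branco","white"),("w","white")]

def check_prediction_py_alt (predicted_color : String) (actual_color : String) : Bool :=
  let p := canonTable.get? (PySem.Str.strip (PySem.Str.lower predicted_color))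
  let a := canonTable.get? (PySem.Str.strip (PySem.Str.lower actual_color))
  p.isSome && p == a

-- ===== PRECONDITION & SPEC =====
def Spec_check_prediction_py (predicted_color : String) (actual_color : String) (out : Bool) : Prop := out = check_prediction_py_alt predicted_color actual_color
instance (predicted_color : String) (actual_color : String) (out : Bool) : Decidable (Spec_check_prediction_py predicted_color actual_color out) := by unfold Spec_check_prediction_py; infer_instance

-- ===== CLAIM (what is proved, stated in full; the proofs are below) =====
def Claim_equal_check_prediction_py : Prop := ∀ (predicted_color : String) (actual_color : String), Dom_check_prediction_py predicted_color actual_color → Spec_check_prediction_py predicted_color actual_color (check_prediction_py predicted_color actual_color)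

-- ===== LEMMAS AND PROOFS =====

lemma canonTable_mk : canonTable = PySem.Dict.mk [("red","red"),("vermelho","red"),("r","red"),
    ("black","black"),("preto","black"),("b","black"),
    ("white","white"),("branco","white"),("w","white")] := by decide

set_option maxRecDepth 10000 in
lemma mem_red (s : String) : (["red","vermelho","r"].contains s) = (canonTable.get? s == some "red") := by
  rw [canonTable_mk]
  simp only [PySem.Dict.get?_mk_cons, List.contains]
  split_ifs <;> simp only [beq_iff_eq] at * <;> (try subst_vars) <;>
    solve
      | decide
      | (simp only [show ∀ t : String, (PySem.Dict.mk ([] : List (String × String))).get? t = none from fun t => rfl,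
           List.elem_eq_mem, List.mem_cons, List.not_mem_nil, or_false]
         refine Eq.trans (decide_eq_false ?_) rfl
         rintro (rfl | rfl | rfl) <;> simp_all)

set_option maxRecDepth 10000 in
lemma mem_black (s : String) : (["black","preto","b"].contains s) = (canonTable.get? s == some "black") := by
  rw [canonTable_mk]
  simp only [PySem.Dict.get?_mk_cons, List.contains]
  split_ifs <;> simp only [beq_iff_eq] at * <;> (try subst_vars) <;>
    solve
      | decide
      | (simp only [show ∀ t : String, (PySem.Dict.mk ([] : List (String × String))).get? t = none from fun t => rfl,
           List.elem_eq_mem, List.mem_cons, List.not_mem_nil, or_false]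
         refine Eq.trans (decide_eq_false ?_) rfl
         rintro (rfl | rfl | rfl) <;> simp_all)

set_option maxRecDepth 10000 in
lemma mem_white (s : String) : (["white","branco","w"].contains s) = (canonTable.get? s == some "white") := by
  rw [canonTable_mk]
  simp only [PySem.Dict.get?_mk_cons, List.contains]
  split_ifs <;> simp only [beq_iff_eq] at * <;> (try subst_vars) <;>
    solve
      | decide
      | (simp only [show ∀ t : String, (PySem.Dict.mk ([] : List (String × String))).get? t = none from fun t => rfl,
           List.elem_eq_mem, List.mem_cons, List.not_mem_nil, or_false]
         refine Eq.trans (decide_eq_false ?_) rfl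
         rintro (rfl | rfl | rfl) <;> simp_all)

set_option maxRecDepth 10000 in
lemma range_canon (s : String) : canonTable.get? s = none ∨ canonTable.get? s = some "red" ∨
    canonTable.get? s = some "black" ∨ canonTable.get? s = some "white" := by
  rw [canonTable_mk]
  simp only [PySem.Dict.get?_mk_cons]
  split_ifs <;> simp [PySem.Dict.get?]

-- A's loop over the three variant groups computes exactly B's table-lookup comparison.
lemma checkLoop_eq_lookup (p a : String) :
    checkLoop p a [("red", ["red","vermelho","r"]), ("black", ["black","preto","b"]), ("white", ["white","branco","w"])]
      = ((canonTable.get? p).isSome && (canonTable.get? p == canonTable.get? a)) := by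
  simp only [checkLoop, mem_red, mem_black, mem_white]
  rcases range_canon p with hp | hp | hp | hp <;> rcases range_canon a with ha | ha | ha | ha <;>
    rw [hp, ha] <;> rfl

-- ===== VERDICT (by name: the statement is the Claim_ definition above) =====
theorem check_prediction_py_spec : Claim_equal_check_prediction_py := by
  intro predicted_color actual_color _
  unfold Spec_check_prediction_py check_prediction_py check_prediction_py_alt
  show checkLoop (PySem.Str.strip (PySem.Str.lower predicted_color)) (PySem.Str.strip (PySem.Str.lower actual_color))
        (PySem.Dict.ofList [("red", ["red","vermelho","r"]), ("black", ["black","preto","b"]),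
          ("white", ["white","branco","w"])]).items
      = ((canonTable.get? (PySem.Str.strip (PySem.Str.lower predicted_color))).isSome &&
         (canonTable.get? (PySem.Str.strip (PySem.Str.lower predicted_color)) ==
          canonTable.get? (PySem.Str.strip (PySem.Str.lower actual_color))))
  rw [show (PySem.Dict.ofList [("red", ["red","vermelho","r"]), ("black", ["black","preto","b"]),
          ("white", ["white","branco","w"])]).items
        = [("red", ["red","vermelho","r"]), ("black", ["black","preto","b"]), ("white", ["white","branco","w"])] from by decide]
  exact checkLoop_eq_lookup _ _
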